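-- pv_equiv track=rewrite | github.com/YerbaPage/plagiarism-certification-helper | demo.py | highlight_overlap
-- ===== SOURCE A (Python) =====
-- n = 3
--
-- def highlight_overlap(sentence1, sentence2, overlap):
--     s1_highlighted = []
--     s2_highlighted = []
--
--     sentence1_flag = 0
--     sentence2_flag = 0
--
--     for i, word in enumerate(sentence1):
--         if ' '.join(sentence1[i:i+n]) in overlap:
--             s1_highlighted.append('<span style="background-color: #FFFF00">{}</span>'.format(word))
--             sentence1_flag = n
--         elif sentence1_flag > 0:
--             s1_highlighted.append('<span style="background-color: #FFFF00">{}</span>'.format(word))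
--             sentence1_flag -= 1
--         else:
--             s1_highlighted.append(word)
--             sentence1_flag -= 1
--
--     for i, word in enumerate(sentence2):
--         if ' '.join(sentence2[i:i+n]) in overlap:
--             s2_highlighted.append('<span style="background-color: #FFFF00">{}</span>'.format(word))
--             sentence2_flag = n
--         elif sentence2_flag > 0:
--             s2_highlighted.append('<span style="background-color: #FFFF00">{}</span>'.format(word))
--             sentence2_flag -= 1
--         else:
--             s2_highlighted.append(word)
--             sentence2_flag -= 1
--
--     s1_highlighted = ' '.join(s1_highlighted)
--     s2_highlighted = ' '.join(s2_highlighted)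
--     return s1_highlighted, s2_highlighted
-- ===== SOURCE B (Python) =====
-- n = 3
-- SPAN = '<span style="background-color: #FFFF00">{}</span>'
--
-- def highlight_overlap(sentence1, sentence2, overlap):
--     def render(words):
--         m = [' '.join(words[i:i+n]) in overlap for i in range(len(words))]
--         return ' '.join(SPAN.format(w) if any(m[max(0, j-n):j+1]) else w
--                         for j, w in enumerate(words))
--     return render(sentence1), render(sentence2)
-- ===== Notes on version B (the rewrite author's own statement) =====
-- stated objective: alternative
-- what changed: Replaced the duplicated running flag-countdown loops by one shared helper doing two passes per sentence: a boolean table of n-gram match starts, then a sliding-window any() over the last n+1 table entries to decide each word's highlighting.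
import Mathlib
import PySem

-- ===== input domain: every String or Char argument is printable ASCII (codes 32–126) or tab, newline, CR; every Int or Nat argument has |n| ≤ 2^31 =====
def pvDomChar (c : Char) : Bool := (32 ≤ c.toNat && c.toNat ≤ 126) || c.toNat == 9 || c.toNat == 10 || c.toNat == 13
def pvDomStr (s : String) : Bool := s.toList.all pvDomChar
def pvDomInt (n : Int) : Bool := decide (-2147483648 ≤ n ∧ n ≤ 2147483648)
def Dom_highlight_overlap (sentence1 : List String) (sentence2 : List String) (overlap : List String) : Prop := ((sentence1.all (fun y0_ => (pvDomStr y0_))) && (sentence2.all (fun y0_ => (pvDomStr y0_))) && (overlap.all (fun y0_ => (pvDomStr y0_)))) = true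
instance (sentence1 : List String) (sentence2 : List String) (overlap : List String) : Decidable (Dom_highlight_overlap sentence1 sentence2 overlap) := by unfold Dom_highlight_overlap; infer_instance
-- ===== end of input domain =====

-- B replaces A's running flag-countdown loop (duplicated per sentence) by one shared two-pass
-- helper: an n-gram match-start table, then a sliding-window any() per word — alternative
-- decomposition, same cost.

-- ===== PORT A =====
-- '<span style="background-color: #FFFF00">{}</span>'.format(word)
def pvSpan (w : String) : String :=
  PySem.Str.join "" ["<span style=\"background-color: #FFFF00\">", w, "</span>"]

-- ' '.join(words[i:i+n]) in overlap   (n = 3; shared literally by both Pythons)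
def pvMatch (words overlap : List String) (i : Int) : Bool :=
  decide (PySem.Str.join " " (PySem.List.slice words (some i) (some (i + 3))) ∈ overlap)

-- A's loop body: enumerate with the flag state (flag set to 3 on a match, decremented otherwise)
def pvGoA (words overlap : List String) : List (Int × String) → Int → List String
  | [], _ => []
  | (i, word) :: rest, flag =>
    if pvMatch words overlap i then
      pvSpan word :: pvGoA words overlap rest 3
    else if flag > 0 then
      pvSpan word :: pvGoA words overlap rest (flag - 1)
    else
      word :: pvGoA words overlap rest (flag - 1)

def highlight_overlap (sentence1 : List String) (sentence2 : List String) (overlap : List String) : String × String :=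
  (PySem.Str.join " " (pvGoA sentence1 overlap (PySem.List.enumerate sentence1 0) 0),
   PySem.Str.join " " (pvGoA sentence2 overlap (PySem.List.enumerate sentence2 0) 0))

-- ===== PORT B =====
-- render(words): match-start table m, then window any(m[max(0, j-n):j+1]) per word
def pvRender (overlap words : List String) : String :=
  let m : List Bool := (PySem.List.pyRange 0 (words.length : Int)).map (fun i => pvMatch words overlap i)
  PySem.Str.join " "
    ((PySem.List.enumerate words 0).map (fun jw =>
      if (PySem.List.slice m (some (max 0 (jw.1 - 3))) (some (jw.1 + 1))).any id then pvSpan jw.2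
      else jw.2))

def highlight_overlap_alt (sentence1 : List String) (sentence2 : List String) (overlap : List String) : String × String :=
  (pvRender overlap sentence1, pvRender overlap sentence2)

-- ===== PRECONDITION & SPEC =====
def Spec_highlight_overlap (sentence1 : List String) (sentence2 : List String) (overlap : List String) (out : String × String) : Prop := out = highlight_overlap_alt sentence1 sentence2 overlap
instance (sentence1 : List String) (sentence2 : List String) (overlap : List String) (out : String × String) : Decidable (Spec_highlight_overlap sentence1 sentence2 overlap out) := by unfold Spec_highlight_overlap; infer_instance

-- ===== CLAIM (what is proved, stated in full; the proofs are below) =====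
def Claim_equal_highlight_overlap : Prop := ∀ (sentence1 : List String) (sentence2 : List String) (overlap : List String), Dom_highlight_overlap sentence1 sentence2 overlap → Spec_highlight_overlap sentence1 sentence2 overlap (highlight_overlap sentence1 sentence2 overlap)

-- ===== LEMMAS AND PROOFS =====

-- the value of A's flag when entering index j
def pvFlagAt (words overlap : List String) : Nat → Int
  | 0 => 0
  | j + 1 => if pvMatch words overlap (j : Int) then 3 else pvFlagAt words overlap j - 1

lemma pvFlagAt_gt (words overlap : List String) :
    ∀ (j : Nat) (c : Int), 0 ≤ c →
      (pvFlagAt words overlap j > c ↔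
        ∃ i : Nat, i < j ∧ pvMatch words overlap (i : Int) = true ∧ (j : Int) - i + c ≤ 3) := by
  intro j
  induction j with
  | zero => intro c hc; simp [pvFlagAt]; omega
  | succ j ih =>
      intro c hc
      by_cases hm : pvMatch words overlap (j : Int) = true
      · simp only [pvFlagAt, hm, if_true]
        constructor
        · intro h
          exact ⟨j, by omega, hm, by push_cast; omega⟩
        · rintro ⟨i, hi, _, hle⟩
          have h2 : (i : Int) ≤ (j : Int) := by exact_mod_cast Nat.le_of_lt_succ hi
          push_cast at hle; omega
      · simp only [pvFlagAt, hm, Bool.false_eq_true, if_false]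
        have h' := ih (c + 1) (by omega)
        constructor
        · intro h
          obtain ⟨i, hi, him, hle⟩ := h'.mp (by omega)
          exact ⟨i, by omega, him, by push_cast at hle ⊢; omega⟩
        · rintro ⟨i, hi, him, hle⟩
          have hij : i ≠ j := by rintro rfl; exact hm him
          have h3 : pvFlagAt words overlap j > c + 1 :=
            h'.mpr ⟨i, by omega, him, by push_cast at hle ⊢; omega⟩
          omega

-- per-index highlighting decision of A
def pvHlA (words overlap : List String) (j : Nat) : Bool :=
  pvMatch words overlap (j : Int) || decide (pvFlagAt words overlap j > 0)

lemma pvGoA_eq_map (words overlap : List String) :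
    ∀ (l : List String) (k : Nat),
      pvGoA words overlap (PySem.List.enumerate l (k : Int)) (pvFlagAt words overlap k) =
      (PySem.List.enumerate l (k : Int)).map
        (fun jw => if pvHlA words overlap jw.1.toNat then pvSpan jw.2 else jw.2) := by
  intro l
  induction l with
  | nil => intro k; simp [PySem.List.enumerate_nil, pvGoA]
  | cons w l ih =>
      intro k
      rw [PySem.List.enumerate_cons, List.map_cons]
      have hk1 : (k : Int) + 1 = ((k + 1 : Nat) : Int) := by push_cast; ring
      simp only [pvGoA]
      by_cases hm : pvMatch words overlap (k : Int) = true
      · have hf : pvFlagAt words overlap (k + 1) = 3 := by simp [pvFlagAt, hm]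
        rw [if_pos hm]
        congr 1
        · simp [pvHlA, hm]
        · rw [hk1, ← hf, ih]
      · have hf : pvFlagAt words overlap (k + 1) = pvFlagAt words overlap k - 1 := by
          simp [pvFlagAt, hm]
        rw [if_neg hm]
        by_cases hflag : pvFlagAt words overlap k > 0
        · rw [if_pos hflag]
          congr 1
          · simp [pvHlA, hm, hflag]
          · rw [hk1, ← hf, ih]
        · rw [if_neg hflag]
          congr 1
          · simp [pvHlA, hm, hflag]
          · rw [hk1, ← hf, ih]

-- A highlights index j iff some match start lies in the window [j-3, j]
lemma pvHlA_iff (words overlap : List String) (j : Nat) :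
    pvHlA words overlap j = true ↔
      ∃ i : Nat, i ≤ j ∧ (j : Int) - i ≤ 3 ∧ pvMatch words overlap (i : Int) = true := by
  unfold pvHlA
  rw [Bool.or_eq_true, decide_eq_true_eq, pvFlagAt_gt words overlap j 0 le_rfl]
  constructor
  · rintro (h | ⟨i, hi, him, hle⟩)
    · exact ⟨j, le_rfl, by omega, h⟩
    · exact ⟨i, by omega, by omega, him⟩
  · rintro ⟨i, hi, hle, him⟩
    by_cases hij : i = j
    · subst hij; exact Or.inl him
    · exact Or.inr ⟨i, by omega, him, by omega⟩

-- B's window condition at index k (< words.length) equals the same existential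
lemma pvWindow_iff (words overlap : List String) (k : Nat) (hk : k < words.length) :
    ((PySem.List.slice
        ((PySem.List.pyRange 0 (words.length : Int)).map (fun i => pvMatch words overlap i))
        (some (max 0 ((k : Int) - 3))) (some ((k : Int) + 1))).any id = true) ↔
      ∃ i : Nat, i ≤ k ∧ (k : Int) - i ≤ 3 ∧ pvMatch words overlap (i : Int) = true := by
  rw [PySem.List.pyRange_zero_natCast, List.map_map,
    PySem.List.slice_toNat _ (by omega) (by omega), List.any_eq_true]
  set a := (max 0 ((k : Int) - 3)).toNat with ha
  have ha' : (a : Int) = max 0 ((k : Int) - 3) := Int.toNat_of_nonneg (by omega)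
  constructor
  · rintro ⟨b, hb, hid⟩
    obtain ⟨p, hp, hpe⟩ := List.getElem_of_mem hb
    rw [List.getElem_take, List.getElem_drop, List.getElem_map, List.getElem_range] at hpe
    simp only [List.length_take, List.length_drop, List.length_map, List.length_range] at hp
    refine ⟨a + p, by omega, by push_cast; omega, ?_⟩
    simp only [Function.comp] at hpe
    rw [hpe]
    simpa using hid
  · rintro ⟨i, hik, hwin, him⟩
    have hai : a ≤ i := by omega
    have hL : i - a < (List.take ((((k : Int) + 1)).toNat - a)
        (List.drop a (List.map (fun x => pvMatch words overlap ((x : Nat) : Int))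
          (List.range words.length)))).length := by
      simp only [List.length_take, List.length_drop, List.length_map, List.length_range]
      omega
    refine ⟨_, List.getElem_mem hL, ?_⟩
    show id _ = true
    rw [List.getElem_take, List.getElem_drop, List.getElem_map, List.getElem_range]
    simp only [id]
    rw [show a + (i - a) = i by omega]
    exact him

-- one sentence: A's loop equals B's render
lemma pvLoop_eq_render (words overlap : List String) :
    PySem.Str.join " " (pvGoA words overlap (PySem.List.enumerate words 0) 0) =
      pvRender overlap words := by
  unfold pvRender
  have h := pvGoA_eq_map words overlap words 0
  rw [show pvFlagAt words overlap 0 = 0 from rfl] at h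
  simp only [Nat.cast_zero] at h
  rw [h]
  congr 1
  apply List.map_congr_left
  intro jw hjw
  obtain ⟨k, hk, rfl⟩ := (PySem.List.mem_enumerate_iff _ _ _).mp hjw
  simp only [zero_add, Int.toNat_natCast]
  by_cases hcond : pvHlA words overlap k = true
  · rw [if_pos hcond,
      if_pos ((pvWindow_iff words overlap k hk).mpr ((pvHlA_iff words overlap k).mp hcond))]
  · rw [if_neg (by simpa using hcond),
      if_neg (fun hc => hcond ((pvHlA_iff words overlap k).mpr ((pvWindow_iff words overlap k hk).mp hc)))]

-- ===== VERDICT (by name: the statement is the Claim_ definition above) =====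
theorem highlight_overlap_spec : Claim_equal_highlight_overlap := by
  intro s1 s2 overlap _
  unfold Spec_highlight_overlap highlight_overlap highlight_overlap_alt
  rw [pvLoop_eq_render s1 overlap, pvLoop_eq_render s2 overlap]
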